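-- pv_equiv track=rewrite | github.com/IvanKuleshov1/tasksPY | tasks/task10Sergey.py | delete_none_lines
-- ===== SOURCE A (Python) =====
-- def delete_none_lines(arr):
--     i = 0
--     while i < len(arr):
--         if arr[i][0] is None:
--             arr.pop(i)
--             i -= 1
--         i += 1
--     return arr
-- ===== SOURCE B (Python) =====
-- def delete_none_lines(arr):
--     # In-place two-pointer compaction: copy kept rows forward, truncate the tail.
--     w = 0
--     for row in arr:
--         if row[0] is not None:
--             arr[w] = row
--             w += 1
--     del arr[w:]
--     return arr
-- ===== Notes on version B (the rewrite author's own statement) =====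
-- stated objective: alternative
-- what changed: Replaced the while-loop with repeated arr.pop(i) (each pop shifts the tail) by a single forward write-pointer sweep that copies kept rows in place and truncates once.
import Mathlib
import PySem

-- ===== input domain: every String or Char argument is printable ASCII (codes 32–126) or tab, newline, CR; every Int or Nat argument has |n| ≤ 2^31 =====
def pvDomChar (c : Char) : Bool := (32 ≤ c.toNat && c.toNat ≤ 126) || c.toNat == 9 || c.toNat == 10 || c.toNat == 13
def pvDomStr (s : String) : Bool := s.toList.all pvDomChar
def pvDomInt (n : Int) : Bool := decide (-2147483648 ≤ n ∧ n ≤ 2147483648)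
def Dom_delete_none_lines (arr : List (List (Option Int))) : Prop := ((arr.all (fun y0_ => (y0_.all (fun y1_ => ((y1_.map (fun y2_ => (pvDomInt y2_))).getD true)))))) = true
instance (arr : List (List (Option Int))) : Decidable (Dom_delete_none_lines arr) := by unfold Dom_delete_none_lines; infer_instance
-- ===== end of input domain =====

-- B replaces the pop(i) removal loop (which shifts the tail at every removal) by a single
-- write-pointer sweep (copy kept rows forward, truncate once); both mutate arr in place in
-- Python, equivalence here is on the returned value.

-- ===== PORT A =====
-- while i < len(arr): if arr[i][0] is None then arr.pop(i); i -= 1; i += 1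
-- (pop at a valid index = eraseIdx; arr[i][0] read via headD none, exact on Pre_: rows nonempty)
-- fuel-guarded while loop (fuel = len(arr) bounds the remaining iterations: each step
-- either pops, shrinking len, or increments i; the loop exits once i reaches len)
def delete_none_lines_loop (fuel : Nat) (arr : List (List (Option Int))) (i : Nat) :
    List (List (Option Int)) :=
  match fuel with
  | 0 => arr
  | fuel + 1 =>
    if i < arr.length then
      if (arr.getD i []).headD none = none then
        delete_none_lines_loop fuel (arr.eraseIdx i) i
      else
        delete_none_lines_loop fuel arr (i + 1)
    else arr

def delete_none_lines (arr : List (List (Option Int))) : List (List (Option Int)) :=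
  delete_none_lines_loop arr.length arr 0

-- ===== PORT B =====
-- forward sweep: append each kept row to the write accumulator (the written prefix), in order
def delete_none_lines_alt (arr : List (List (Option Int))) : List (List (Option Int)) :=
  (arr.foldl (fun acc row => if row.headD none ≠ none then row :: acc else acc) []).reverse

-- ===== PRECONDITION & SPEC =====
-- Pre_ excludes arrays containing an empty row: there Python's arr[i][0] raises IndexError (in both A and B).
def Pre_delete_none_lines (arr : List (List (Option Int))) : Prop :=
  ∀ row ∈ arr, row ≠ []
instance (arr : List (List (Option Int))) : Decidable (Pre_delete_none_lines arr) := by unfold Pre_delete_none_lines; infer_instance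

def pvWitness_delete_none_lines : List (List (Option Int)) := [[some 1, none], [none], [some 3]]

def Spec_delete_none_lines (arr : List (List (Option Int))) (out : List (List (Option Int))) : Prop := out = delete_none_lines_alt arr
instance (arr : List (List (Option Int))) (out : List (List (Option Int))) : Decidable (Spec_delete_none_lines arr out) := by unfold Spec_delete_none_lines; infer_instance

-- ===== CLAIM (what is proved, stated in full; the proofs are below) =====
def Claim_equal_delete_none_lines : Prop := ∀ (arr : List (List (Option Int))), Dom_delete_none_lines arr → Pre_delete_none_lines arr → Spec_delete_none_lines arr (delete_none_lines arr)

-- ===== LEMMAS AND PROOFS =====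

def pvKeep (row : List (Option Int)) : Bool := row.head?.getD none ≠ none

theorem loopA_eq_filter (n : ℕ) : ∀ (arr : List (List (Option Int))) (i : Nat),
    arr.length - i ≤ n →
    delete_none_lines_loop n arr i = arr.take i ++ (arr.drop i).filter pvKeep := by
  induction n with
  | zero =>
    intro arr i hle
    rw [delete_none_lines_loop]
    rw [List.take_of_length_le (by omega), List.drop_eq_nil_of_le (by omega)]
    simp
  | succ n ih =>
    intro arr i hle
    rw [delete_none_lines_loop]
    by_cases h : i < arr.length
    · have hdrop : arr.drop i = arr[i] :: arr.drop (i + 1) :=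
        List.drop_eq_getElem_cons h
      have hget : arr.getD i [] = arr[i] := List.getD_eq_getElem arr [] h
      rw [List.headD_eq_head?_getD] at *
      by_cases hnone : (arr.getD i []).head?.getD none = none
      · rw [if_pos h, if_pos hnone]
        have hlen : (arr.eraseIdx i).length = arr.length - 1 :=
          List.length_eraseIdx_of_lt h
        rw [ih (arr.eraseIdx i) i (by omega)]
        rw [List.eraseIdx_eq_take_drop_succ]
        have hi : i ≤ arr.length := le_of_lt h
        have htk : (List.take i arr ++ List.drop (i + 1) arr).take i = List.take i arr := by
          rw [List.take_append_of_le_length (by simp [List.length_take]; omega)]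
          rw [List.take_take, min_self]
        have hdr : (List.take i arr ++ List.drop (i + 1) arr).drop i = List.drop (i + 1) arr := by
          rw [List.drop_append_of_le_length (by simp [List.length_take]; omega)]
          simp [List.drop_eq_nil_of_le, List.length_take, min_eq_left hi]
        rw [htk, hdr]
        congr 1
        rw [hdrop, List.filter_cons]
        have hkf : pvKeep arr[i] = false := by
          rw [hget] at hnone; simp [pvKeep]; exact hnone
        simp [hkf]
      · rw [if_pos h, if_neg hnone]
        rw [ih arr (i + 1) (by omega)]
        have hkeep : pvKeep arr[i] = true := by
          rw [hget] at hnone; simp [pvKeep]; exact hnone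
        have hta : List.take (i + 1) arr = List.take i arr ++ [arr[i]] := by
          rw [List.take_add_one, List.getElem?_eq_getElem h]; rfl
        rw [hdrop, List.filter_cons, hkeep, hta, List.append_assoc]
        simp
    · rw [if_neg h]
      rw [List.take_of_length_le (by omega), List.drop_eq_nil_of_le (by omega)]
      simp

theorem foldl_rev (arr : List (List (Option Int))) :
    ∀ acc, arr.foldl (fun acc row => if row.headD none ≠ none then row :: acc else acc) acc
      = (arr.filter pvKeep).reverse ++ acc := by
  induction arr with
  | nil => intro acc; simp
  | cons r t ih =>
    intro acc
    simp only [List.foldl_cons, List.filter_cons]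
    rw [List.headD_eq_head?_getD]
    by_cases hk : r.head?.getD none = none
    · have hkf : pvKeep r = false := by simp [pvKeep]; exact hk
      rw [if_neg (by simpa using hk), ih, hkf]
      simp
    · have hkt : pvKeep r = true := by simp [pvKeep]; exact hk
      rw [if_pos (by simpa using hk), ih, hkt]
      simp

theorem alt_eq_filter (arr : List (List (Option Int))) :
    delete_none_lines_alt arr = arr.filter pvKeep := by
  unfold delete_none_lines_alt
  rw [foldl_rev]
  simp

-- ===== VERDICT (by name: the statement is the Claim_ definition above) =====
theorem delete_none_lines_spec : Claim_equal_delete_none_lines := by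
  intro arr _ _
  unfold Spec_delete_none_lines delete_none_lines
  rw [alt_eq_filter, loopA_eq_filter arr.length arr 0 (by omega)]
  simp
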